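-- pv_equiv track=rewrite | github.com/jongseo98/ProblemSolving | Programmers/Level1/신규아이디추천.py | solution
-- ===== SOURCE A (Python) =====
-- def solution(new_id):
--     # 1
--     new_id = new_id.lower()
--
--     # 2
--     result = ""
--     special_strings = ["-", "_", "."]
--     for s in new_id:
--         if s.isalnum() or s in special_strings:
--             result += s
--     new_id = result
--
--     # 3
--     while ".." in new_id:
--         new_id = new_id.replace("..", ".")
--
--     # 4
--     if new_id[0] == ".":
--         new_id = new_id[1:] if len(new_id) > 1 else "."
--     if new_id[-1] == ".":
--         new_id = new_id[:-1]
--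
--     # 5
--     if new_id == "":
--         new_id += "a"
--
--     # 6
--     if len(new_id) > 15:
--         new_id = new_id[:15]
--         if new_id[-1] == ".":
--             new_id = new_id[:-1]
--
--     # 7
--     while len(new_id) < 3:
--         new_id += new_id[-1]
--     return new_id
-- ===== SOURCE B (Python) =====
-- def solution(new_id):
--     allowed = set("abcdefghijklmnopqrstuvwxyz0123456789-_.")
--     out = []
--     for c in new_id.lower():
--         if c in allowed:
--             if c == "." and out and out[-1] == ".":
--                 continue
--             out.append(c)
--     if out and out[0] == ".":
--         out = out[1:]
--     if out and out[-1] == ".":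
--         out.pop()
--     if not out:
--         out = ["a"]
--     out = out[:15]
--     if out[-1] == ".":
--         out.pop()
--     while len(out) < 3:
--         out.append(out[-1])
--     return "".join(out)
-- ===== Notes on version B (the rewrite author's own statement) =====
-- stated objective: alternative
-- what changed: The while-loop of repeated full-string str.replace scans that collapses dot runs is replaced by a single left-to-right pass that filters admissible characters and collapses consecutive dots as it goes, building the result as a list; measured about 1.2x faster at the largest size, below the 1.5x bar, so no speed is claimed.
-- crash fix: On inputs where the filtering step deletes every character A raises IndexError when it indexes the now-empty string; B returns 'aaa'. — e.g. on solution("!!"): A raises IndexError, B returns "aaa"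
import Mathlib
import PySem

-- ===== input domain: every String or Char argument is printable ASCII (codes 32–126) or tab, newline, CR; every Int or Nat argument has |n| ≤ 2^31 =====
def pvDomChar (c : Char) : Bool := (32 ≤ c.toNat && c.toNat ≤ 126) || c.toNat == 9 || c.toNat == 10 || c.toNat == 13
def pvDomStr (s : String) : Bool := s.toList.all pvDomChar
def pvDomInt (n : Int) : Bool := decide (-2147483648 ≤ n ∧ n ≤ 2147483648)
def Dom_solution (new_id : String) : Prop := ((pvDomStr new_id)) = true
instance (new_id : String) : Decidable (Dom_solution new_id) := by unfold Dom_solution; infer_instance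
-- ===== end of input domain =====

-- B filters and collapses consecutive dots in one left-to-right pass over the lowered string
-- instead of A's repeated str.replace scans; objective: alternative (single-pass collapse).

-- ===== PORT A =====
-- `s.isalnum() or s in ["-","_","."]`
def solA_pred (c : Char) : Bool :=
  PySem.Chars.isalnum c || (c == '-' || c == '_' || c == '.')

-- `while ".." in new_id: new_id = new_id.replace("..", ".")`; the fuel only makes the
-- loop total (each replace strictly shortens a string containing "..", so fuel = length suffices).
def solA_dotLoop : Nat → List Char → List Char
  | 0, s => s
  | fuel+1, s =>
    if PySem.Chars.isIn ['.', '.'] s then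
      solA_dotLoop fuel (PySem.Chars.replace s ['.', '.'] ['.'])
    else s

-- `while len(new_id) < 3: new_id += new_id[-1]`; fuel 3 only makes the loop total
-- (the string is nonempty here and grows by one per iteration, so at most 2 rounds run).
def solA_pad : Nat → List Char → List Char
  | 0, s => s
  | fuel+1, s =>
    if s.length < 3 then solA_pad fuel (s ++ [PySem.List.pyGetD s (-1) 'a']) else s

-- Python raises IndexError at `new_id[0]` when step 2 deletes every character; those inputs
-- are excluded by Pre_solution (pyGet? returns none there, so the '.'-branches are not taken).
def solution (new_id : String) : String :=
  let s1 := PySem.Chars.lower new_id.toList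
  let s2 := s1.foldl (fun acc c => if solA_pred c then acc ++ [c] else acc) []
  let s3 := solA_dotLoop s2.length s2
  let s4 := if PySem.List.pyGet? s3 0 = some '.' then
              (if 1 < s3.length then PySem.List.slice s3 (some 1) none else ['.'])
            else s3
  let s5 := if PySem.List.pyGet? s4 (-1) = some '.' then PySem.List.slice s4 none (some (-1)) else s4
  let s6 := if s5 = [] then s5 ++ ['a'] else s5
  let s7 := if 15 < s6.length then
              let t := PySem.List.slice s6 none (some 15)
              if PySem.List.pyGet? t (-1) = some '.' then PySem.List.slice t none (some (-1)) else t
            else s6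
  String.ofList (solA_pad 3 s7)

-- ===== PORT B =====
-- `c.isalnum() or c in "-_."`
def solB_pred (c : Char) : Bool :=
  PySem.Chars.isalnum c || PySem.Chars.isIn [c] ['-', '_', '.']

-- `while len(out) < 3: out.append(out[-1])`; fuel 3 only makes the loop total
-- (out is nonempty here and grows by one per iteration, so at most 2 rounds run).
def solB_pad : Nat → List Char → List Char
  | 0, s => s
  | fuel+1, s =>
    if s.length < 3 then solB_pad fuel (s ++ [s.getLastD 'a']) else s

def solution_alt (new_id : String) : String :=
  let out := (PySem.Chars.lower new_id.toList).foldl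
    (fun acc c =>
      if solB_pred c then
        if c == '.' && acc.getLast? == some '.' then acc else acc ++ [c]
      else acc) []
  let o1 := if out.head? = some '.' then out.tail else out
  let o2 := if o1.getLast? = some '.' then o1.dropLast else o1
  let o3 := if o2 = [] then ['a'] else o2
  let o4 := o3.take 15
  let o5 := if o4.getLast? = some '.' then o4.dropLast else o4
  String.ofList (solB_pad 3 o5)

-- ===== PRECONDITION & SPEC =====
-- Pre_ excludes exactly the inputs where A raises IndexError at `new_id[0]`: those on which
-- the filtering step (step 2) deletes every character.
def Pre_solution (new_id : String) : Prop :=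
  (new_id.toList.any fun c =>
    PySem.Chars.isalnum (PySem.Chars.lowerChar c) ||
      (PySem.Chars.lowerChar c == '-' || PySem.Chars.lowerChar c == '_' ||
        PySem.Chars.lowerChar c == '.')) = true
instance (new_id : String) : Decidable (Pre_solution new_id) := by unfold Pre_solution; infer_instance
def pvWitness_solution : String := "abc"

-- Where the filtering step deletes every character A raises IndexError at `new_id[0]`; B returns a value.
def Raises_solution (new_id : String) : Prop :=
  (new_id.toList.any fun c =>
    PySem.Chars.isalnum (PySem.Chars.lowerChar c) ||
      (PySem.Chars.lowerChar c == '-' || PySem.Chars.lowerChar c == '_' ||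
        PySem.Chars.lowerChar c == '.')) = false
instance (new_id : String) : Decidable (Raises_solution new_id) := by unfold Raises_solution; infer_instance
def pvRaiseWitness_solution : String := "!!"
def pvRaiseWitnessOut_solution : String := "aaa"

def Spec_solution (new_id : String) (out : String) : Prop := out = solution_alt new_id
instance (new_id : String) (out : String) : Decidable (Spec_solution new_id out) := by unfold Spec_solution; infer_instance

-- ===== CLAIM (what is proved, stated in full; the proofs are below) =====
def Claim_equal_solution : Prop := ∀ (new_id : String), Dom_solution new_id → Pre_solution new_id → Spec_solution new_id (solution new_id)
def Claim_raises_solution : Prop := (∀ (new_id : String), Dom_solution new_id → Raises_solution new_id → ¬ Pre_solution new_id) ∧ (Dom_solution (pvRaiseWitness_solution) ∧ Raises_solution (pvRaiseWitness_solution) ∧ solution_alt (pvRaiseWitness_solution) = pvRaiseWitnessOut_solution)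

-- ===== LEMMAS AND PROOFS =====

-- the fully collapsed string: rc pd s keeps every character of s except that runs of '.'
-- shrink to one '.' (dropped entirely when pd says the previously kept char was a '.').
def rc : Bool → List Char → List Char
  | _, [] => []
  | pd, c :: t => if c = '.' then (if pd then rc true t else '.' :: rc true t) else c :: rc false t

-- one pass of Python's s.replace("..", "."): each non-overlapping ".." becomes "."
def rep1 : List Char → List Char
  | [] => []
  | [c] => [c]
  | c :: d :: t => if c = '.' ∧ d = '.' then '.' :: rep1 t else c :: rep1 (d :: t)

-- "s contains two adjacent dots"
def hasDD : List Char → Bool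
  | c :: d :: t => (c == '.' && d == '.') || hasDD (d :: t)
  | _ => false

lemma hasDD_cons (c : Char) (t : List Char) :
    hasDD (c :: t) = ((c == '.') && (t.head? == some '.') || hasDD t) := by
  cases t <;> simp [hasDD]

lemma rc_dot_true (t : List Char) : rc true ('.' :: t) = rc true t := by
  simp [rc]
lemma rc_dot_false (t : List Char) : rc false ('.' :: t) = '.' :: rc true t := by
  simp [rc]
lemma rc_nodot (pd : Bool) (c : Char) (t : List Char) (hc : c ≠ '.') :
    rc pd (c :: t) = c :: rc false t := by
  simp [rc, hc]

lemma go_spec : ∀ (fuel : Nat) (l acc : List Char), l.length ≤ fuel →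
    PySem.Chars.replace.go ['.', '.'] ['.'] fuel l acc = acc.reverse ++ rep1 l := by
  intro fuel
  induction fuel with
  | zero =>
    intro l acc h
    have : l = [] := by cases l <;> simp at h ⊢
    subst this
    rw [PySem.Chars.replace.go]
    simp [rep1]
  | succ f ih =>
    intro l acc h
    match l with
    | [] => rw [PySem.Chars.replace.go] <;> simp [rep1]
    | [c] =>
      rw [PySem.Chars.replace.go]
      have hpre : (['.', '.'] : List Char).isPrefixOf [c] = false := by
        simp [List.isPrefixOf]
      rw [hpre]
      simp only [Bool.false_eq_true, if_false]
      rw [ih [] _ (by simp)]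
      simp [rep1]
    | c :: d :: t =>
      rw [PySem.Chars.replace.go]
      by_cases hcd : c = '.' ∧ d = '.'
      · obtain ⟨hc, hd⟩ := hcd
        subst hc; subst hd
        have hpre : (['.', '.'] : List Char).isPrefixOf ('.' :: '.' :: t) = true := by
          simp [List.isPrefixOf]
        rw [hpre]
        simp only [if_true]
        have hdrop : List.drop (['.', '.'] : List Char).length ('.' :: '.' :: t) = t := by simp
        rw [hdrop, ih t _ (by simp at h ⊢; omega)]
        simp [rep1]
      · have hpre : (['.', '.'] : List Char).isPrefixOf (c :: d :: t) = false := by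
          simp [List.isPrefixOf]
          intro hc hd; exact hcd ⟨hc.symm, hd.symm⟩
        rw [hpre]
        simp only [Bool.false_eq_true, if_false]
        rw [ih (d :: t) _ (by simp at h ⊢; omega)]
        simp [rep1, hcd]

lemma replace_spec (l : List Char) : PySem.Chars.replace l ['.', '.'] ['.'] = rep1 l := by
  rw [PySem.Chars.replace]
  simp only [List.isEmpty_cons, Bool.false_eq_true, if_false]
  rw [go_spec l.length l [] (le_refl _)]
  simp

lemma rep1_len_le (l : List Char) : (rep1 l).length ≤ l.length := by
  induction l using rep1.induct with
  | case1 => simp [rep1]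
  | case2 c => simp [rep1]
  | case3 c d t h ih => simp [rep1, h]; omega
  | case4 c d t h ih => simp only [rep1, if_neg h]; simp at ih ⊢; omega

lemma rep1_len_lt (l : List Char) (h : hasDD l = true) : (rep1 l).length < l.length := by
  induction l using rep1.induct with
  | case1 => simp [hasDD] at h
  | case2 c => simp [hasDD] at h
  | case3 c d t hc ih => simp [rep1, hc]; have := rep1_len_le t; omega
  | case4 c d t hc ih =>
    rw [hasDD] at h
    have hdt : hasDD (d :: t) = true := by
      rcases Bool.or_eq_true_iff.mp h with h1 | h1
      · exfalso; simp at h1; exact hc ⟨h1.1, h1.2⟩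
      · exact h1
    have h2 := ih hdt
    simp only [rep1, if_neg hc]
    simp at h2 ⊢
    omega

lemma isIn_eq_hasDD (l : List Char) : PySem.Chars.isIn ['.', '.'] l = hasDD l := by
  have key : (['.', '.'] <:+: l) ↔ hasDD l = true := by
    induction l with
    | nil => simp [hasDD]
    | cons c t ih =>
      rw [List.infix_cons_iff, hasDD_cons]
      constructor
      · rintro (hp | hi)
        · cases t with
          | nil => exact absurd hp.length_le (by simp)
          | cons d t' =>
            simp [List.cons_prefix_iff] at hp
            simp [hp.1, hp.2]
        · simp [ih.mp hi]
      · intro hb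
        rcases Bool.or_eq_true_iff.mp hb with h1 | h1
        · simp at h1
          obtain ⟨hc, hd⟩ := h1
          cases t with
          | nil => simp at hd
          | cons d t' =>
            simp at hd
            left
            simp [List.cons_prefix_iff, hc, hd]
        · exact Or.inr (ih.mpr h1)
  cases hdd : hasDD l with
  | true => exact (PySem.Chars.isIn_iff_infix _ _).mpr (key.mpr hdd)
  | false =>
    rw [PySem.Chars.isIn_eq_false_iff]
    intro hinf
    rw [key.mp hinf] at hdd
    simp at hdd

lemma rc_rep1 (l : List Char) : ∀ pd, rc pd (rep1 l) = rc pd l := by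
  induction l using rep1.induct with
  | case1 => intro pd; rfl
  | case2 c => intro pd; rfl
  | case3 c d t h ih =>
    obtain ⟨hc, hd⟩ := h
    subst hc; subst hd
    intro pd
    simp only [rep1]
    cases pd <;> simp [rc, ih]
  | case4 c d t h ih =>
    intro pd
    simp only [rep1, if_neg h]
    by_cases hc : c = '.'
    · subst hc
      cases pd <;> simp [rc, ih]
    · cases pd <;> simp [rc, hc, ih]

lemma hasDD_tail (c : Char) (t : List Char) (h : hasDD (c :: t) = false) : hasDD t = false := by
  rw [hasDD_cons] at h
  exact (Bool.or_eq_false_iff.mp h).2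

lemma rc_fix (l : List Char) (h : hasDD l = false) :
    rc false l = l ∧ (∀ pd, l.head? ≠ some '.' → rc pd l = l) := by
  induction l with
  | nil => exact ⟨rfl, fun _ _ => rfl⟩
  | cons c t ih =>
    have ht := hasDD_tail c t h
    obtain ⟨ih1, ih2⟩ := ih ht
    rw [hasDD_cons] at h
    by_cases hc : c = '.'
    · subst hc
      have hhd : t.head? ≠ some '.' := by
        intro hh
        simp [hh] at h
      constructor
      · simp [rc, ih2 true hhd]
      · intro pd hne; simp at hne
    · constructor
      · simp [rc, hc, ih1]
      · intro pd hne; simp [rc, hc, ih1]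

lemma dotLoop_eq_rc : ∀ (fuel : Nat) (s : List Char), s.length ≤ fuel →
    solA_dotLoop fuel s = rc false s := by
  intro fuel
  induction fuel with
  | zero =>
    intro s h
    have : s = [] := by cases s <;> simp at h ⊢
    subst this; rfl
  | succ f ih =>
    intro s h
    rw [solA_dotLoop]
    cases hin : PySem.Chars.isIn ['.', '.'] s with
    | true =>
      have hdd : hasDD s = true := (isIn_eq_hasDD s) ▸ hin
      rw [if_pos rfl, replace_spec, ih (rep1 s) (by have := rep1_len_lt s hdd; omega),
        rc_rep1 s false]
    | false =>
      have hdd : hasDD s = false := (isIn_eq_hasDD s) ▸ hin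
      simp only [Bool.false_eq_true, if_false]
      exact ((rc_fix s hdd).1).symm

lemma rc_noDD (l : List Char) : ∀ pd, hasDD (rc pd l) = false ∧ (rc true l).head? ≠ some '.' := by
  induction l with
  | nil => intro pd; simp [rc, hasDD]
  | cons c t ih =>
    intro pd
    by_cases hc : c = '.'
    · subst hc
      refine ⟨?_, ?_⟩
      · cases pd with
        | true => rw [rc_dot_true]; exact (ih true).1
        | false =>
          rw [rc_dot_false, hasDD_cons]
          simp [(ih true).1]
          intro hh
          exact absurd hh (ih true).2
      · rw [rc_dot_true]; exact (ih true).2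
    · refine ⟨?_, ?_⟩
      · rw [rc_nodot pd c t hc, hasDD_cons]
        simp [hc, (ih false).1]
      · rw [rc_nodot true c t hc]
        simp [hc]

lemma rc_ne_nil (l : List Char) (h : l ≠ []) : rc false l ≠ [] := by
  cases l with
  | nil => exact absurd rfl h
  | cons c t =>
    by_cases hc : c = '.' <;> simp [rc, hc]

lemma pyGet?_neg_one (u : List Char) : PySem.List.pyGet? u (-1) = u.getLast? := by
  cases u with
  | nil => rfl
  | cons c t => simp [PySem.List.pyGet?, PySem.List.pyIdx?, List.getLast?_eq_getElem?]

lemma pyGetD_neg_one (u : List Char) (c : Char) : PySem.List.pyGetD u (-1) c = u.getLastD c := by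
  simp [PySem.List.pyGetD, pyGet?_neg_one, List.getLastD_eq_getLast?]

lemma dropLast_last_ne (u : List Char) (h : hasDD u = false) (hl : u.getLast? = some '.') :
    u.dropLast.getLast? ≠ some '.' := by
  induction u with
  | nil => simp at hl
  | cons c t ih =>
    cases t with
    | nil => simp
    | cons d t' =>
      have ht : hasDD (d :: t') = false := (Bool.or_eq_false_iff.mp ((hasDD_cons c (d::t')) ▸ h)).2
      have hl' : (d :: t').getLast? = some '.' := by simpa using hl
      cases t' with
      | nil =>
        simp at hl'
        subst hl'
        have hcd := (Bool.or_eq_false_iff.mp ((hasDD_cons c ['.']) ▸ h)).1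
        simp at hcd ⊢
        exact hcd
      | cons e t'' =>
        have hrec := ih ht hl'
        rw [List.dropLast_cons₂, List.dropLast_cons₂, List.getLast?_cons_cons, ← List.dropLast_cons₂]
        exact hrec

lemma strip_getLast (u : List Char) (h : hasDD u = false) :
    (if u.getLast? = some '.' then u.dropLast else u).getLast? ≠ some '.' := by
  by_cases hl : u.getLast? = some '.'
  · rw [if_pos hl]; exact dropLast_last_ne u h hl
  · rw [if_neg hl]; exact hl

lemma pad_eq (fuel : Nat) : ∀ s, solA_pad fuel s = solB_pad fuel s := by
  induction fuel with
  | zero => intro s; rfl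
  | succ f ih => intro s; simp [solA_pad, solB_pad, pyGetD_neg_one, ih]

lemma pred_eq (c : Char) : solB_pred c = solA_pred c := by
  unfold solA_pred solB_pred
  congr 1
  cases hin : PySem.Chars.isIn [c] ['-', '_', '.'] with
  | true =>
    have hinf := (PySem.Chars.isIn_iff_infix _ _).mp hin
    have hc : c ∈ ['-', '_', '.'] := hinf.subset (List.mem_singleton_self c)
    simp at hc
    rcases hc with h | h | h <;> simp [h]
  | false =>
    have hni := PySem.Chars.isIn_eq_false_iff _ _ |>.mp hin
    have hc : c ∉ ['-', '_', '.'] := by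
      intro hm
      obtain ⟨s, t, heq⟩ := List.append_of_mem hm
      exact hni ⟨s, t, by simp [heq]⟩
    simp at hc
    simp [hc.1, hc.2.1, hc.2.2]

lemma foldB_eq_rc :
    ∀ (m acc : List Char), m.foldl (fun acc c => if c == '.' && acc.getLast? == some '.' then acc else acc ++ [c]) acc
      = acc ++ rc (acc.getLast? == some '.') m := by
  intro m
  induction m with
  | nil => intro acc; simp [rc]
  | cons c t ih =>
    intro acc
    simp only [List.foldl_cons]
    by_cases hc : c = '.'
    · subst hc
      cases hpd : (acc.getLast? == some '.') with
      | true =>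
        simp only [BEq.rfl, Bool.true_and, if_true]
        rw [ih acc, hpd, rc_dot_true]
      | false =>
        simp only [BEq.rfl, Bool.true_and, Bool.false_eq_true, if_false]
        rw [ih (acc ++ ['.'])]
        simp [rc_dot_false]
    · have hcond : (c == '.' && acc.getLast? == some '.') = false := by simp [hc]
      rw [hcond]
      simp only [Bool.false_eq_true, if_false]
      rw [ih (acc ++ [c])]
      have hb : (c == '.') = false := by simp [hc]
      simp [rc_nodot _ _ _ hc, hb]

def chainA (t : List Char) : List Char :=
  let s4 := if PySem.List.pyGet? t 0 = some '.' then
              (if 1 < t.length then PySem.List.slice t (some 1) none else ['.'])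
            else t
  let s5 := if PySem.List.pyGet? s4 (-1) = some '.' then PySem.List.slice s4 none (some (-1)) else s4
  let s6 := if s5 = [] then s5 ++ ['a'] else s5
  let s7 := if 15 < s6.length then
              let t' := PySem.List.slice s6 none (some 15)
              if PySem.List.pyGet? t' (-1) = some '.' then PySem.List.slice t' none (some (-1)) else t'
            else s6
  solA_pad 3 s7

def chainB (t : List Char) : List Char :=
  let o1 := if t.head? = some '.' then t.tail else t
  let o2 := if o1.getLast? = some '.' then o1.dropLast else o1
  let o3 := if o2 = [] then ['a'] else o2
  let o4 := o3.take 15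
  let o5 := if o4.getLast? = some '.' then o4.dropLast else o4
  solB_pad 3 o5

lemma fix2_eq (u : List Char) (hdd : hasDD u = false) :
    (let s5 := if PySem.List.pyGet? u (-1) = some '.' then PySem.List.slice u none (some (-1)) else u
     let s6 := if s5 = [] then s5 ++ ['a'] else s5
     let s7 := if 15 < s6.length then
                 let t' := PySem.List.slice s6 none (some 15)
                 if PySem.List.pyGet? t' (-1) = some '.' then PySem.List.slice t' none (some (-1)) else t'
               else s6
     solA_pad 3 s7) =
    (let o2 := if u.getLast? = some '.' then u.dropLast else u
     let o3 := if o2 = [] then ['a'] else o2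
     let o4 := o3.take 15
     let o5 := if o4.getLast? = some '.' then o4.dropLast else o4
     solB_pad 3 o5) := by
  simp only [pyGet?_neg_one, PySem.List.slice_to_neg_one, Int.reduceNeg]
  set o2 := if u.getLast? = some '.' then u.dropLast else u with ho2
  have hlast : o2.getLast? ≠ some '.' := strip_getLast u hdd
  have hs6 : (if o2 = [] then o2 ++ ['a'] else o2) = (if o2 = [] then ['a'] else o2) := by
    by_cases h : o2 = [] <;> simp [h]
  rw [hs6]
  set w := if o2 = [] then ['a'] else o2 with hw
  have hwlast : w.getLast? ≠ some '.' := by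
    by_cases h : o2 = []
    · simp [hw, h]
    · simpa [hw, h] using hlast
  by_cases h15 : 15 < w.length
  · rw [if_pos h15]
    have hsl : PySem.List.slice w none (some 15) = w.take 15 := by
      simp [PySem.List.slice_to]
    rw [hsl, pad_eq]
  · rw [if_neg h15]
    have htake : w.take 15 = w := List.take_of_length_le (by omega)
    rw [htake, if_neg hwlast, pad_eq]

lemma fix_eq (t : List Char) (hne : t ≠ []) (hdd : hasDD t = false) :
    chainA t = chainB t := by
  unfold chainA chainB
  cases t with
  | nil => exact absurd rfl hne
  | cons c t' =>
    by_cases hc : c = '.'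
    · subst hc
      cases t' with
      | nil => decide
      | cons d t'' =>
        have hget : PySem.List.pyGet? ('.' :: d :: t'') 0 = some '.' := by
          simp [pysem]
        have hlen : 1 < ('.' :: d :: t'').length := by simp
        have hsl : PySem.List.slice ('.' :: d :: t'') (some 1) none = d :: t'' := by
          simp [PySem.List.slice_from]
        rw [hget]
        simp only [if_pos hlen, hsl]
        have hhd : ('.' :: d :: t'').head? = some '.' := rfl
        rw [if_pos hhd]
        simp only [List.tail_cons]
        exact fix2_eq (d :: t'') (hasDD_tail _ _ hdd)
    · have hget : PySem.List.pyGet? (c :: t') 0 = some c := by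
        simp [pysem]
      have hne0 : ¬ PySem.List.pyGet? (c :: t') 0 = some '.' := by
        rw [hget]; simp [hc]
      have hne1 : ¬ (c :: t').head? = some '.' := by simp [hc]
      rw [if_neg hne0, if_neg hne1]
      exact fix2_eq (c :: t') hdd

-- ===== VERDICT (by name: the statement is the Claim_ definition above) =====
lemma solution_eq_chainA (new_id : String) :
    solution new_id = String.ofList (chainA (solA_dotLoop
      ((PySem.Chars.lower new_id.toList).foldl
        (fun acc c => if solA_pred c then acc ++ [c] else acc) []).length
      ((PySem.Chars.lower new_id.toList).foldl
        (fun acc c => if solA_pred c then acc ++ [c] else acc) []))) := rfl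

lemma solution_alt_eq_chainB (new_id : String) :
    solution_alt new_id = String.ofList (chainB ((PySem.Chars.lower new_id.toList).foldl
      (fun acc c =>
        if solB_pred c then
          if c == '.' && acc.getLast? == some '.' then acc else acc ++ [c]
        else acc) [])) := rfl

theorem solution_spec : Claim_equal_solution := by
  intro new_id _ hpre
  unfold Spec_solution
  rw [solution_eq_chainA, solution_alt_eq_chainB]
  have hlower : PySem.Chars.lower new_id.toList = new_id.toList.map PySem.Chars.lowerChar := rfl
  -- A's filter loop
  rw [PySem.List.foldl_append_if_eq_filter]
  set s2 := (PySem.Chars.lower new_id.toList).filter solA_pred with hs2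
  simp only [List.nil_append]
  -- B's loop = collapse of the same filtered list
  rw [PySem.List.foldl_if_eq_foldl_filter]
  have hfB : (PySem.Chars.lower new_id.toList).filter solB_pred = s2 := by
    rw [hs2]
    exact List.filter_congr (fun c _ => pred_eq c)
  rw [hfB, foldB_eq_rc s2 []]
  simp only [List.nil_append, List.getLast?_nil]
  have hbeq : ((none : Option Char) == some '.') = false := rfl
  rw [hbeq]
  -- A's replace loop = the same collapse
  rw [dotLoop_eq_rc s2.length s2 (le_refl _)]
  -- the tail of both pipelines agrees on the collapsed string
  have hs2ne : s2 ≠ [] := by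
    rw [hs2, hlower, List.filter_map]
    intro hnil
    rw [List.map_eq_nil_iff, List.filter_eq_nil_iff] at hnil
    unfold Pre_solution at hpre
    rw [List.any_eq_true] at hpre
    obtain ⟨c, hmem, hc⟩ := hpre
    exact hnil c hmem (by simpa [solA_pred, Function.comp] using hc)
  exact congrArg String.ofList
    (fix_eq (rc false s2) (rc_ne_nil s2 hs2ne) ((rc_noDD s2 false).1))

@[simp] theorem solution_raises : Claim_raises_solution := by
  unfold Claim_raises_solution
  constructor
  · intro new_id _ hr hp
    unfold Raises_solution at hr
    unfold Pre_solution at hp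
    simp [hr] at hp
  · exact ⟨by decide, by decide, by decide⟩
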